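-- pv_equiv track=rewrite | github.com/mdariusz/logia | Rozwiazania/dukaty.py | dukaty
-- ===== SOURCE A (Python) =====
-- def dukaty(dzien):
--     stan = 0
--     for kolejny in range(1, dzien + 1):
--         stan = stan + 1
--         if kolejny % 5 == 0:
--             stan = stan + 2
--         if stan >= 50:
--             stan = stan - (3 * stan) // 4
--     return stan
-- ===== SOURCE B (Python) =====
-- # Coin count after `dzien` days. The daily update depends only on (stan, day mod 5),
-- # a bounded state, so the sequence of end-of-day balances is eventually periodic.
-- # B answers from a precomputed table of the pre-periodic prefix and one full
-- # period in O(1) instead of simulating every day.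
--
-- _TABLE = [0, 1, 2, 3, 4, 7, 8, 9, 10, 11, 14, 15, 16, 17, 18, 21, 22, 23, 24, 25, 28, 29, 30, 31, 32, 35, 36, 37, 38, 39, 42, 43, 44, 45, 46, 49, 13, 14, 15, 16, 19, 20, 21, 22, 23, 26, 27, 28, 29, 30, 33, 34, 35, 36, 37, 40, 41, 42, 43, 44, 47, 48, 49, 13, 14, 17, 18, 19, 20, 21, 24, 25, 26, 27, 28, 31, 32, 33, 34, 35, 38, 39, 40, 41, 42, 45, 46, 47, 48, 49, 13, 14, 15, 16, 17, 20, 21, 22, 23, 24, 27, 28, 29, 30, 31, 34, 35, 36, 37, 38, 41, 42, 43, 44, 45, 48, 49, 13, 14, 15, 18, 19, 20, 21, 22, 25, 26, 27, 28, 29, 32, 33, 34, 35, 36, 39, 40, 41, 42, 43, 46, 47, 48, 49, 13, 16, 17, 18, 19, 20, 23, 24, 25, 26, 27, 30, 31, 32, 33, 34, 37, 38, 39, 40, 41, 44, 45, 46, 47, 48]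
--
-- def dukaty(dzien):
--     if dzien < 0:
--         return 0
--     if dzien < 170:
--         return _TABLE[dzien]
--     return _TABLE[90 + (dzien - 90) % 80]
-- ===== Notes on version B (the rewrite author's own statement) =====
-- stated objective: faster
-- what changed: Replaces the day-by-day simulation with a constant-time lookup: the daily update depends only on the balance and the day number mod 5, a bounded state, so the balance sequence is eventually periodic; B precomputes the pre-periodic prefix plus one full period as a table and answers by indexing it.
import Mathlib
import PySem

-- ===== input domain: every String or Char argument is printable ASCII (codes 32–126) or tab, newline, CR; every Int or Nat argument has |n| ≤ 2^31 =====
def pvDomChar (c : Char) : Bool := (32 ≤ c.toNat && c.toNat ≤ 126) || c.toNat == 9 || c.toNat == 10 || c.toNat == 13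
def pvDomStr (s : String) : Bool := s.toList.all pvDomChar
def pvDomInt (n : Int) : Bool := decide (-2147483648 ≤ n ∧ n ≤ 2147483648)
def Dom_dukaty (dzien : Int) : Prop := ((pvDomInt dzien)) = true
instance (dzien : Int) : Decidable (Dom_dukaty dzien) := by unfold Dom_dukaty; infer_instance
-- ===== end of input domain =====

-- B replaces A's O(dzien) day-by-day simulation by an O(1) lookup in a precomputed
-- table of the 90-day prefix and one 80-day period of the (eventually periodic) balance sequence.


-- ===== PORT A =====
def dukaty (dzien : Int) : Int :=
  (PySem.List.pyRange 1 (dzien + 1) 1).foldl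
    (fun stan kolejny =>
      let stan := stan + 1
      let stan := if PySem.Int.mod kolejny 5 = 0 then stan + 2 else stan
      if stan ≥ 50 then stan - PySem.Int.floordiv (3 * stan) 4 else stan)
    0

-- ===== PORT B =====
def dukatyTable : List Int :=
  [0, 1, 2, 3, 4, 7, 8, 9, 10, 11, 14, 15, 16, 17, 18, 21, 22, 23, 24, 25, 28, 29, 30, 31, 32, 35, 36, 37, 38, 39, 42, 43, 44, 45, 46, 49, 13, 14, 15, 16, 19, 20, 21, 22, 23, 26, 27, 28, 29, 30, 33, 34, 35, 36, 37, 40, 41, 42, 43, 44, 47, 48, 49, 13, 14, 17, 18, 19, 20, 21, 24, 25, 26, 27, 28, 31, 32, 33, 34, 35, 38, 39, 40, 41, 42, 45, 46, 47, 48, 49, 13, 14, 15, 16, 17, 20, 21, 22, 23, 24, 27, 28, 29, 30, 31, 34, 35, 36, 37, 38, 41, 42, 43, 44, 45, 48, 49, 13, 14, 15, 18, 19, 20, 21, 22, 25, 26, 27, 28, 29, 32, 33, 34, 35, 36, 39, 40, 41, 42, 43, 46, 47, 48, 49, 13, 16, 17, 18, 19, 20, 23, 24, 25, 26, 27, 30,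 31, 32, 33, 34, 37, 38, 39, 40, 41, 44, 45, 46, 47, 48]

def dukaty_alt (dzien : Int) : Int :=
  if dzien < 0 then 0
  else if dzien < 170 then PySem.List.pyGetD dukatyTable dzien 0
  else PySem.List.pyGetD dukatyTable (90 + PySem.Int.mod (dzien - 90) 80) 0

-- ===== PRECONDITION & SPEC =====
def Spec_dukaty (dzien : Int) (out : Int) : Prop := out = dukaty_alt dzien
instance (dzien : Int) (out : Int) : Decidable (Spec_dukaty dzien out) := by unfold Spec_dukaty; infer_instance

-- ===== CLAIM (what is proved, stated in full; the proofs are below) =====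
def Claim_equal_dukaty : Prop := ∀ (dzien : Int), Dom_dukaty dzien → Spec_dukaty dzien (dukaty dzien)

-- ===== LEMMAS AND PROOFS =====

/-- One day's update (A's loop body). -/
def dstep (stan kolejny : Int) : Int :=
  let stan := stan + 1
  let stan := if PySem.Int.mod kolejny 5 = 0 then stan + 2 else stan
  if stan ≥ 50 then stan - PySem.Int.floordiv (3 * stan) 4 else stan

/-- Balance after `n` days. -/
def g : Nat → Int
  | 0 => 0
  | n + 1 => dstep (g n) ((n : Int) + 1)

set_option maxRecDepth 20000 in
theorem dukaty_eq_g (n : Nat) : dukaty ((n : Int)) = g n := by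
  induction n with
  | zero => simp [dukaty, g, PySem.List.pyRange_one_eq_nil]
  | succ n ih =>
    unfold dukaty at ih ⊢
    push_cast
    rw [PySem.List.pyRange_one_succ_right (show (1:Int) ≤ (n : Int) + 1 by omega),
      List.foldl_append, ih]
    show g (n + 1) = dstep (g n) ((n : Int) + 1)
    rfl

theorem dstep_congr (s k1 k2 : Int) (h : PySem.Int.mod k1 5 = PySem.Int.mod k2 5) :
    dstep s k1 = dstep s k2 := by
  simp only [dstep, h]

set_option maxRecDepth 20000 in
theorem g_period (m : Nat) : g (90 + m + 80) = g (90 + m) := by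
  induction m with
  | zero => decide
  | succ m ih =>
    have e1 : 90 + (m + 1) + 80 = (90 + m + 80) + 1 := by omega
    have e2 : 90 + (m + 1) = (90 + m) + 1 := by omega
    rw [e1, e2]
    show dstep (g (90 + m + 80)) (((90 + m + 80 : Nat) : Int) + 1)
       = dstep (g (90 + m)) (((90 + m : Nat) : Int) + 1)
    rw [ih]
    apply dstep_congr
    rw [PySem.Int.mod_eq_emod_of_pos (by norm_num), PySem.Int.mod_eq_emod_of_pos (by norm_num)]
    omega

theorem g_periods (q m : Nat) : g (90 + m + 80 * q) = g (90 + m) := by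
  induction q with
  | zero => rfl
  | succ q ih =>
    have : 90 + m + 80 * (q + 1) = 90 + (m + 80 * q) + 80 := by ring
    rw [this, g_period (m + 80 * q), show 90 + (m + 80 * q) = 90 + m + 80 * q from by ring, ih]

set_option maxRecDepth 40000 in
theorem g_small : ∀ n : Fin 170, g n.val = dukatyTable.getD n.val 0 := by decide

-- ===== VERDICT (by name: the statement is the Claim_ definition above) =====
theorem dukaty_spec : Claim_equal_dukaty := by
  intro dzien _
  show dukaty dzien = dukaty_alt dzien
  unfold dukaty_alt
  split_ifs with hneg h170
  · -- dzien < 0 : empty range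
    simp [dukaty, PySem.List.pyRange_one_eq_nil (by omega : dzien + 1 ≤ 1)]
  · -- 0 ≤ dzien < 170
    obtain ⟨n, rfl⟩ : ∃ n : Nat, dzien = (n : Int) := ⟨dzien.toNat, by omega⟩
    have hn : n < 170 := by omega
    rw [dukaty_eq_g, g_small ⟨n, hn⟩, PySem.List.pyGetD_natCast]
  · -- 170 ≤ dzien
    obtain ⟨n, rfl⟩ : ∃ n : Nat, dzien = (n : Int) := ⟨dzien.toNat, by omega⟩
    have hn : 170 ≤ n := by omega
    rw [dukaty_eq_g]
    set r : Nat := (n - 90) % 80 with hr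
    have hidx : (90 : Int) + PySem.Int.mod ((n : Int) - 90) 80 = ((90 + r : Nat) : Int) := by
      rw [PySem.Int.mod_eq_emod_of_pos (by norm_num)]; omega
    rw [hidx, PySem.List.pyGetD_natCast]
    have hr170 : 90 + r < 170 := by omega
    have hdecomp : n = 90 + r + 80 * ((n - 90) / 80) := by omega
    rw [hdecomp, g_periods, g_small ⟨90 + r, hr170⟩]
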